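-- pv_equiv track=rewrite | github.com/verlab/MusicalHyperlapse_SIBGRAPI_2021 | combiner/profgen.py | get_valars_from_quads
-- ===== SOURCE A (Python) =====
-- def get_valars_from_quads(quadrants,num_classes_sqrt):
--
--     valences = []
--     arousals = []
--     nc_ax = num_classes_sqrt
--     for quadrant in quadrants:
--         v,a,q = 0,0,0
--         while(q<quadrant):
--             q+=1
--             v+=1
--             if(v>(nc_ax-1)):
--                 v=0
--                 a+=1
--         valences.append(v)
--         arousals.append(a)
--
--     return valences, arousals
-- ===== SOURCE B (Python) =====
-- def get_valars_from_quads(quadrants, num_classes_sqrt):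
--     # each quadrant index is walked forward max(q, 0) steps on the wrapping
--     # valence/arousal grid; in closed form that is divmod of the step count
--     valences = [max(q, 0) % num_classes_sqrt for q in quadrants]
--     arousals = [max(q, 0) // num_classes_sqrt for q in quadrants]
--     return valences, arousals
-- ===== Notes on version B (the rewrite author's own statement) =====
-- stated objective: faster
-- what changed: Replaces the per-element counting loop (stepping q up to quadrant while wrapping a valence counter) with the closed form valence = max(q,0) % num_classes_sqrt, arousal = max(q,0) // num_classes_sqrt.
-- outside the precondition, e.g. on get_valars_from_quads([3], 0): A returns ([0], [3]), B raises ZeroDivisionError; on get_valars_from_quads([3], -2): A returns ([0], [3]), B returns ([-1], [-2])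
import Mathlib
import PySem

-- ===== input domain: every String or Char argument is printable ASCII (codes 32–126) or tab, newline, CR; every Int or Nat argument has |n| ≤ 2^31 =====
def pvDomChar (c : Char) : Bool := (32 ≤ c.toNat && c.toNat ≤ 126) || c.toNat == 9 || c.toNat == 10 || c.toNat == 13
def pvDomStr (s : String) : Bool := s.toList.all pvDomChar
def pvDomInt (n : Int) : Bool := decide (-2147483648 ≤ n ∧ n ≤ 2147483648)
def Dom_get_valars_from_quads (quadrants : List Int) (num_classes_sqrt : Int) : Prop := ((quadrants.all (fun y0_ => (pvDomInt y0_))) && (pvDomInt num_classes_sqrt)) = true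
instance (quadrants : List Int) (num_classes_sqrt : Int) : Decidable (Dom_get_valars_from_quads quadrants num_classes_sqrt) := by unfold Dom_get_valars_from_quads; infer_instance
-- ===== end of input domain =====

-- B replaces A's per-quadrant counting walk (max(q,0) steps on the wrapping grid) with the closed form
-- divmod(max(q,0), n): asymptotically faster.

-- ===== PORT A =====
-- the inner 'while q < quadrant' loop of A, on state (q, v, a)
def pvInnerA (nc_ax quadrant q v a : Int) : Int × Int :=
  if q < quadrant then
    let q' := q + 1
    let v' := v + 1
    if v' > nc_ax - 1 then pvInnerA nc_ax quadrant q' 0 (a + 1)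
    else pvInnerA nc_ax quadrant q' v' a
  else (v, a)
termination_by (quadrant - q).toNat
decreasing_by all_goals omega

def get_valars_from_quads (quadrants : List Int) (num_classes_sqrt : Int) : List Int × List Int :=
  let nc_ax := num_classes_sqrt
  let r := quadrants.foldl (fun (acc : List Int × List Int) quadrant =>
    let va := pvInnerA nc_ax quadrant 0 0 0
    (acc.1 ++ [va.1], acc.2 ++ [va.2])) ([], [])
  (r.1, r.2)

-- ===== PORT B =====
def get_valars_from_quads_alt (quadrants : List Int) (num_classes_sqrt : Int) : List Int × List Int :=
  (quadrants.map (fun q => PySem.Int.mod (max q 0) num_classes_sqrt),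
   quadrants.map (fun q => PySem.Int.floordiv (max q 0) num_classes_sqrt))

-- ===== PRECONDITION & SPEC =====
-- Pre_ requires a positive class count: at num_classes_sqrt = 0 B raises ZeroDivisionError, and for
-- num_classes_sqrt < 0 (a meaningless grid size) A's answer (valence pinned to 0 by the always-firing
-- wrap branch) and B's floor-division value are both unspecified corners.
def Pre_get_valars_from_quads (quadrants : List Int) (num_classes_sqrt : Int) : Prop :=
  1 ≤ num_classes_sqrt
instance (quadrants : List Int) (num_classes_sqrt : Int) : Decidable (Pre_get_valars_from_quads quadrants num_classes_sqrt) := by unfold Pre_get_valars_from_quads; infer_instance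
def pvWitness_get_valars_from_quads : List Int × Int := ([0, 1, 2, 3, 4, 5, 7], 2)

def Spec_get_valars_from_quads (quadrants : List Int) (num_classes_sqrt : Int) (out : List Int × List Int) : Prop := out = get_valars_from_quads_alt quadrants num_classes_sqrt
instance (quadrants : List Int) (num_classes_sqrt : Int) (out : List Int × List Int) : Decidable (Spec_get_valars_from_quads quadrants num_classes_sqrt out) := by unfold Spec_get_valars_from_quads; infer_instance

-- ===== CLAIM (what is proved, stated in full; the proofs are below) =====
def Claim_equal_get_valars_from_quads : Prop := ∀ (quadrants : List Int) (num_classes_sqrt : Int), Dom_get_valars_from_quads quadrants num_classes_sqrt → Pre_get_valars_from_quads quadrants num_classes_sqrt → Spec_get_valars_from_quads quadrants num_classes_sqrt (get_valars_from_quads quadrants num_classes_sqrt)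

-- ===== LEMMAS AND PROOFS =====

-- loop invariant: on state (q, v, a) with v = q % n and a = q / n, the inner loop lands on (Q % n, Q / n)
theorem pvInnerA_eq (n Q : Int) (hn : 0 < n) :
    ∀ k (q v a : Int), (Q - q).toNat = k → 0 ≤ q → q ≤ Q → v = q % n → a = q / n →
      pvInnerA n Q q v a = (Q % n, Q / n) := by
  intro k
  induction k with
  | zero =>
    intro q v a hk h0 hle hv ha
    have hq : q = Q := by omega
    rw [pvInnerA]
    simp [hq.symm, hv, ha]
  | succ k ih =>
    intro q v a hk h0 hle hv ha
    have hlt : q < Q := by omega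
    have hne : n ≠ 0 := by omega
    have hv0 : 0 ≤ v := hv ▸ Int.emod_nonneg q hne
    have hvn : v < n := hv ▸ Int.emod_lt_of_pos q hn
    have hqd : n * a + v = q := by rw [hv, ha]; exact Int.mul_ediv_add_emod q n
    rw [pvInnerA]
    simp only [hlt, if_pos]
    by_cases hc : v + 1 > n - 1
    · -- v = n - 1 : wrap
      have hveq : v = n - 1 := by omega
      have hq1 : q + 1 = n * (a + 1) := by
        have hm : n * (a + 1) = n * a + n := by ring
        omega
      simp only [hc, if_pos]
      apply ih (q + 1) 0 (a + 1) (by omega) (by omega) (by omega)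
      · rw [hq1, Int.mul_emod_right]
      · rw [hq1, Int.mul_ediv_cancel_left _ hne]
    · -- no wrap
      have hmod : (q + 1) % n = v + 1 := by
        have : q + 1 = (v + 1) + n * a := by omega
        rw [this, Int.add_mul_emod_self_left, Int.emod_eq_of_lt (by omega) (by omega)]
      have hdiv : (q + 1) / n = a := by
        have : q + 1 = (v + 1) + n * a := by omega
        rw [this, Int.add_mul_ediv_left _ _ hne,
            Int.ediv_eq_zero_of_lt (by omega) (by omega), zero_add]
      simp only [hc, if_false]
      exact ih (q + 1) (v + 1) a (by omega) (by omega) (by omega) hmod.symm hdiv.symm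

theorem pvInnerA_closed (n Q : Int) (hn : 0 < n) :
    pvInnerA n Q 0 0 0 = (PySem.Int.mod (max Q 0) n, PySem.Int.floordiv (max Q 0) n) := by
  rw [PySem.Int.mod_eq_emod_of_pos hn, PySem.Int.floordiv_eq_ediv_of_pos hn]
  by_cases hQ : Q ≤ 0
  · rw [max_eq_right hQ, pvInnerA]
    simp [show ¬ (0 < Q) by omega]
  · rw [max_eq_left (by omega : (0:Int) ≤ Q)]
    exact pvInnerA_eq n Q hn (Q - 0).toNat 0 0 0 rfl le_rfl (by omega) (by simp) (by simp)

theorem pvFoldl_eq (n : Int) (hn : 0 < n) :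
    ∀ (l : List Int) (acc1 acc2 : List Int),
      l.foldl (fun (acc : List Int × List Int) quadrant =>
          let va := pvInnerA n quadrant 0 0 0
          (acc.1 ++ [va.1], acc.2 ++ [va.2])) (acc1, acc2)
        = (acc1 ++ l.map (fun q => PySem.Int.mod (max q 0) n),
           acc2 ++ l.map (fun q => PySem.Int.floordiv (max q 0) n)) := by
  intro l
  induction l with
  | nil => intro acc1 acc2; simp
  | cons x xs ih =>
    intro acc1 acc2
    simp only [List.foldl_cons, List.map_cons]
    rw [pvInnerA_closed n x hn, ih]
    simp

-- ===== VERDICT (by name: the statement is the Claim_ definition above) =====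
theorem get_valars_from_quads_spec : Claim_equal_get_valars_from_quads := by
  intro quadrants n _ hpre
  have hn : (1:Int) ≤ n := hpre
  unfold Spec_get_valars_from_quads get_valars_from_quads get_valars_from_quads_alt
  simp only
  rw [pvFoldl_eq n (by omega) quadrants [] []]
  simp
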